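-- pv_equiv track=rewrite | github.com/nakurahe/CS5330 | final_project/VLM/analyze_jigsaw_vlm.py | get_neighbor_position_pairs
-- ===== SOURCE A (Python) =====
-- def get_neighbor_position_pairs(n_rows: int = 3, n_cols: int = 3):
--     """All horizontal/vertical neighbor pairs (pos_a, pos_b) with pos_a < pos_b."""
--     pairs = []
--     for r in range(n_rows):
--         for c in range(n_cols):
--             idx = r * n_cols + c
--             if c + 1 < n_cols:           # right
--                 pairs.append((idx, idx + 1))
--             if r + 1 < n_rows:           # down
--                 pairs.append((idx, idx + n_cols))
--     return pairs
-- ===== SOURCE B (Python) =====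
-- def get_neighbor_position_pairs(n_rows: int = 3, n_cols: int = 3):
--     """All horizontal/vertical neighbor pairs (pos_a, pos_b) with pos_a < pos_b."""
--     pairs = [(r * n_cols + c, r * n_cols + c + 1)
--              for r in range(n_rows) for c in range(n_cols - 1)]
--     pairs += [(r * n_cols + c, (r + 1) * n_cols + c)
--               for r in range(n_rows - 1) for c in range(n_cols)]
--     pairs.sort()
--     return pairs
-- ===== Notes on version B (the rewrite author's own statement) =====
-- stated objective: alternative
-- what changed: Instead of one nested row/column sweep with two per-cell conditional appends, B builds all horizontal pairs and all vertical pairs in two separate comprehensions over trimmed ranges and recovers A's interleaved emission order with one lexicographic sort.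
import Mathlib
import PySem

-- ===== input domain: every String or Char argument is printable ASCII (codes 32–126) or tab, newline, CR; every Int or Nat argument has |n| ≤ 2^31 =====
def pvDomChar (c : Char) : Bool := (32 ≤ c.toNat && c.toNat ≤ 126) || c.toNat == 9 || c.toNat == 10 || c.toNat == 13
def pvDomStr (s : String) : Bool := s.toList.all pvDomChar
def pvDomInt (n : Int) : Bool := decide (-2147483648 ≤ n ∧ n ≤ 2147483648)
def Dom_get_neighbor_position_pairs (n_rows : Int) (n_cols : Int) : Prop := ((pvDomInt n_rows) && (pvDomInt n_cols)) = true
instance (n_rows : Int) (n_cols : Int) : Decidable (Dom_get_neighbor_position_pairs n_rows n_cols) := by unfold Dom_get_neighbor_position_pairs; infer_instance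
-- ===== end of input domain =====

-- B replaces A's single nested sweep (two conditional appends per cell) by two separate
-- comprehensions over trimmed ranges plus one lexicographic sort (objective: alternative).

-- ===== PORT A =====
def get_neighbor_position_pairs (n_rows : Int) (n_cols : Int) : List (Int × Int) :=
  (PySem.List.pyRange 0 n_rows 1).foldl (fun pairs r =>
    (PySem.List.pyRange 0 n_cols 1).foldl (fun pairs c =>
      let idx := r * n_cols + c
      let pairs := if c + 1 < n_cols then pairs ++ [(idx, idx + 1)] else pairs
      if r + 1 < n_rows then pairs ++ [(idx, idx + n_cols)] else pairs) pairs) []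

-- ===== PORT B =====
-- Python tuple comparison is lexicographic; Source B's in-place `pairs.sort()` on the
-- concatenated list is ported as `PySem.List.sorted` with the lexicographic key `toLex`
-- (exact for pairs of ints).
def get_neighbor_position_pairs_alt (n_rows : Int) (n_cols : Int) : List (Int × Int) :=
  let horizontal := (PySem.List.pyRange 0 n_rows 1).flatMap (fun r =>
    (PySem.List.pyRange 0 (n_cols - 1) 1).map (fun c => (r * n_cols + c, r * n_cols + c + 1)))
  let vertical := (PySem.List.pyRange 0 (n_rows - 1) 1).flatMap (fun r =>
    (PySem.List.pyRange 0 n_cols 1).map (fun c => (r * n_cols + c, (r + 1) * n_cols + c)))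
  PySem.List.sorted (horizontal ++ vertical) (fun p => toLex p) false

-- ===== PRECONDITION & SPEC =====
def Spec_get_neighbor_position_pairs (n_rows : Int) (n_cols : Int) (out : List (Int × Int)) : Prop := out = get_neighbor_position_pairs_alt n_rows n_cols
instance (n_rows : Int) (n_cols : Int) (out : List (Int × Int)) : Decidable (Spec_get_neighbor_position_pairs n_rows n_cols out) := by unfold Spec_get_neighbor_position_pairs; infer_instance

-- ===== CLAIM (what is proved, stated in full; the proofs are below) =====
def Claim_equal_get_neighbor_position_pairs : Prop := ∀ (n_rows : Int) (n_cols : Int), Dom_get_neighbor_position_pairs n_rows n_cols → Spec_get_neighbor_position_pairs n_rows n_cols (get_neighbor_position_pairs n_rows n_cols)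

-- ===== LEMMAS AND PROOFS =====

-- the two pairs A may emit at cell (r, c)
def pvCell (n_rows n_cols r c : Int) : List (Int × Int) :=
  (if c + 1 < n_cols then [(r * n_cols + c, r * n_cols + c + 1)] else []) ++
  (if r + 1 < n_rows then [(r * n_cols + c, r * n_cols + c + n_cols)] else [])

-- A's output in row-major emission order
def pvCanon (n_rows n_cols : Int) : List (Int × Int) :=
  (PySem.List.pyRange 0 n_rows 1).flatMap (fun r =>
    (PySem.List.pyRange 0 n_cols 1).flatMap (fun c => pvCell n_rows n_cols r c))

lemma pvA_eq_canon (n_rows n_cols : Int) :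
    get_neighbor_position_pairs n_rows n_cols = pvCanon n_rows n_cols := by
  unfold get_neighbor_position_pairs pvCanon
  have hinner : ∀ r (acc : List (Int × Int)),
      (PySem.List.pyRange 0 n_cols 1).foldl (fun pairs c =>
        let idx := r * n_cols + c
        let pairs := if c + 1 < n_cols then pairs ++ [(idx, idx + 1)] else pairs
        if r + 1 < n_rows then pairs ++ [(idx, idx + n_cols)] else pairs) acc
      = acc ++ (PySem.List.pyRange 0 n_cols 1).flatMap (fun c => pvCell n_rows n_cols r c) := by
    intro r acc
    have hb : (fun (pairs : List (Int × Int)) c =>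
        let idx := r * n_cols + c
        let pairs := if c + 1 < n_cols then pairs ++ [(idx, idx + 1)] else pairs
        if r + 1 < n_rows then pairs ++ [(idx, idx + n_cols)] else pairs)
        = fun pairs c => pairs ++ pvCell n_rows n_cols r c := by
      funext pairs c
      simp only [pvCell]
      split_ifs <;> simp
    rw [hb, PySem.List.foldl_append_eq_flatMap]
  have houter : (fun (pairs : List (Int × Int)) r =>
      (PySem.List.pyRange 0 n_cols 1).foldl (fun pairs c =>
        let idx := r * n_cols + c
        let pairs := if c + 1 < n_cols then pairs ++ [(idx, idx + 1)] else pairs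
        if r + 1 < n_rows then pairs ++ [(idx, idx + n_cols)] else pairs) pairs)
      = fun pairs r => pairs ++ (PySem.List.pyRange 0 n_cols 1).flatMap (fun c => pvCell n_rows n_cols r c) := by
    funext pairs r; exact hinner r pairs
  rw [houter, PySem.List.foldl_append_eq_flatMap]
  simp

lemma pvFlatMap_append_perm {α β : Type} (l : List α) (f g : α → List β) :
    (l.flatMap (fun x => f x ++ g x)).Perm (l.flatMap f ++ l.flatMap g) := by
  induction l with
  | nil => simp
  | cons a t ih =>
    simp only [List.flatMap_cons]
    refine ((List.Perm.append_left _ ih).trans ?_)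
    rw [List.append_assoc, List.append_assoc]
    exact List.Perm.append_left _ (List.perm_append_comm_assoc _ _ _)

lemma pvFlatMap_perm_congr {α β : Type} (l : List α) (f g : α → List β)
    (h : ∀ x ∈ l, (f x).Perm (g x)) : (l.flatMap f).Perm (l.flatMap g) := by
  induction l with
  | nil => simp
  | cons a t ih =>
    simp only [List.flatMap_cons]
    exact (h a (by simp)).append (ih (fun x hx => h x (by simp [hx])))

lemma pvFlatMap_if_eq_filter {α β : Type} (l : List α) (p : α → Prop) [DecidablePred p] (K : α → List β) :
    (l.flatMap (fun x => if p x then K x else [])) = (l.filter (fun x => decide (p x))).flatMap K := by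
  induction l with
  | nil => simp
  | cons a t ih =>
    by_cases h : p a <;> simp [List.flatMap_cons, h, ih]

lemma pvFlatMap_sing {α β : Type} (l : List α) (f : α → β) :
    l.flatMap (fun x => [f x]) = l.map f := by
  induction l with
  | nil => simp
  | cons a t ih => simp [List.flatMap_cons, ih]

lemma pvFilter_range_succ_lt (n : Int) :
    (PySem.List.pyRange 0 n 1).filter (fun x => decide (x + 1 < n)) = PySem.List.pyRange 0 (n - 1) 1 := by
  by_cases h : n ≤ 0
  · rw [PySem.List.pyRange_one_eq_nil (by omega), PySem.List.pyRange_one_eq_nil (by omega)]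
    simp
  · have h' : (0:Int) < n := by omega
    rw [PySem.List.pyRange_one_append 0 (n - 1) n (by omega) (by omega)]
    rw [List.filter_append]
    have h1 : (PySem.List.pyRange 0 (n - 1) 1).filter (fun x => decide (x + 1 < n))
        = PySem.List.pyRange 0 (n - 1) 1 := by
      apply List.filter_eq_self.mpr
      intro x hx
      have := PySem.List.mem_pyRange_one.mp hx
      simp; omega
    have h2 : PySem.List.pyRange (n - 1) n 1 = [n - 1] := by
      have h3 := PySem.List.pyRange_one_singleton (n - 1)
      rw [show n - 1 + 1 = n from by omega] at h3
      exact h3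
    rw [h1, h2]
    simp

lemma pvMem_cell_fst {n_rows n_cols r c : Int} {p : Int × Int}
    (hp : p ∈ pvCell n_rows n_cols r c) : p.1 = r * n_cols + c := by
  simp only [pvCell, List.mem_append] at hp
  rcases hp with hp | hp <;> (split_ifs at hp <;> simp_all)

lemma pvPairwise_canon (n_rows n_cols : Int) :
    (pvCanon n_rows n_cols).Pairwise (fun p q => toLex p < toLex q) := by
  unfold pvCanon
  rw [List.flatMap_def, List.pairwise_flatten]
  constructor
  · -- each row block
    intro l hl
    simp only [List.mem_map] at hl
    obtain ⟨r, hr, rfl⟩ := hl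
    rw [List.flatMap_def, List.pairwise_flatten]
    constructor
    · -- each cell
      intro l hl
      simp only [List.mem_map] at hl
      obtain ⟨c, hc, rfl⟩ := hl
      have hc' := PySem.List.mem_pyRange_one.mp hc
      simp only [pvCell]
      split_ifs with h1 h2 h2 <;> simp_all [Prod.Lex.toLex_lt_toLex] <;> omega
    · -- cells in c-order
      refine List.Pairwise.map _ ?_ (PySem.List.pairwise_lt_pyRange_one (a := 0) (b := n_cols))
      intro c1 c2 hlt p hp q hq
      have h1 := pvMem_cell_fst hp
      have h2 := pvMem_cell_fst hq
      rw [Prod.Lex.toLex_lt_toLex]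
      left; omega
  · -- rows in r-order
    refine List.Pairwise.map _ ?_ (PySem.List.pairwise_lt_pyRange_one (a := 0) (b := n_rows))
    intro r1 r2 hlt p hp q hq
    simp only [List.flatMap_def, List.mem_flatten, List.mem_map] at hp hq
    obtain ⟨_, ⟨c1, hc1, rfl⟩, hp⟩ := hp
    obtain ⟨_, ⟨c2, hc2, rfl⟩, hq⟩ := hq
    have hb1 := PySem.List.mem_pyRange_one.mp hc1
    have hb2 := PySem.List.mem_pyRange_one.mp hc2
    have h1 := pvMem_cell_fst hp
    have h2 := pvMem_cell_fst hq
    rw [Prod.Lex.toLex_lt_toLex]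
    left
    have : (r1 + 1) * n_cols ≤ r2 * n_cols :=
      mul_le_mul_of_nonneg_right (by omega) (by omega)
    nlinarith [this, hb1.1, hb1.2, hb2.1, hb2.2, h1, h2]

lemma pvCanon_perm (n_rows n_cols : Int) :
    (pvCanon n_rows n_cols).Perm
      (((PySem.List.pyRange 0 n_rows 1).flatMap (fun r =>
          (PySem.List.pyRange 0 (n_cols - 1) 1).map (fun c => (r * n_cols + c, r * n_cols + c + 1)))) ++
       ((PySem.List.pyRange 0 (n_rows - 1) 1).flatMap (fun r =>
          (PySem.List.pyRange 0 n_cols 1).map (fun c => (r * n_cols + c, (r + 1) * n_cols + c))))) := by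
  unfold pvCanon
  -- split each cell into its horizontal and vertical parts
  have step1 : (pvCanon n_rows n_cols).Perm
      ((PySem.List.pyRange 0 n_rows 1).flatMap (fun r =>
        ((PySem.List.pyRange 0 n_cols 1).flatMap (fun c =>
          if c + 1 < n_cols then [(r * n_cols + c, r * n_cols + c + 1)] else [])) ++
        ((PySem.List.pyRange 0 n_cols 1).flatMap (fun c =>
          if r + 1 < n_rows then [(r * n_cols + c, r * n_cols + c + n_cols)] else [])))) := by
    unfold pvCanon
    exact pvFlatMap_perm_congr _ _ _ (fun r _ => pvFlatMap_append_perm _ _ _)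
  refine step1.trans ((pvFlatMap_append_perm _ _ _).trans ?_)
  apply List.Perm.append
  · -- horizontal part: equality
    apply List.Perm.of_eq
    apply List.flatMap_congr  -- pointwise equal
    intro r _
    rw [pvFlatMap_if_eq_filter, pvFilter_range_succ_lt]
    exact pvFlatMap_sing _ _
  · -- vertical part: equality
    apply List.Perm.of_eq
    have : ∀ r : Int, ((PySem.List.pyRange 0 n_cols 1).flatMap (fun c =>
          if r + 1 < n_rows then [(r * n_cols + c, r * n_cols + c + n_cols)] else []))
        = if r + 1 < n_rows then (PySem.List.pyRange 0 n_cols 1).map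
            (fun c => (r * n_cols + c, (r + 1) * n_cols + c)) else [] := by
      intro r
      split_ifs with h
      · rw [pvFlatMap_sing]
        apply List.map_congr_left
        intro c _
        have hc : r * n_cols + c + n_cols = (r + 1) * n_cols + c := by ring
        rw [hc]
      · simp
    calc (PySem.List.pyRange 0 n_rows 1).flatMap (fun r =>
          (PySem.List.pyRange 0 n_cols 1).flatMap (fun c =>
            if r + 1 < n_rows then [(r * n_cols + c, r * n_cols + c + n_cols)] else []))
        = (PySem.List.pyRange 0 n_rows 1).flatMap (fun r =>
            if r + 1 < n_rows then (PySem.List.pyRange 0 n_cols 1).map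
              (fun c => (r * n_cols + c, (r + 1) * n_cols + c)) else []) := by
          apply List.flatMap_congr; intro r _; exact this r
      _ = _ := by
          rw [pvFlatMap_if_eq_filter, pvFilter_range_succ_lt]

-- ===== VERDICT (by name: the statement is the Claim_ definition above) =====
theorem get_neighbor_position_pairs_spec : Claim_equal_get_neighbor_position_pairs := by
  intro n_rows n_cols _
  unfold Spec_get_neighbor_position_pairs get_neighbor_position_pairs_alt
  rw [pvA_eq_canon]
  exact (PySem.List.sorted_eq_of_perm_of_pairwise_lt _ _ _
    (pvCanon_perm n_rows n_cols) (pvPairwise_canon n_rows n_cols)).symm
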